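-- pv_equiv track=rewrite | github.com/nergalyang/codility.com | TapeEquilibrium.py | solution
-- ===== SOURCE A (Python) =====
-- def solution(A):
--     leftSum = A[0]
--     rightSum = sum(A) - leftSum
--     minDiff = abs(leftSum - rightSum)
--     for i in range(1, len(A) - 1):
--         leftSum += A[i]
--         rightSum -= A[i]
--         diff = abs(leftSum - rightSum)
--         minDiff = min([minDiff, diff])
--     return minDiff
-- ===== SOURCE B (Python) =====
-- def solution(A):
--     # Build the full prefix-sum table first, then take the min over split points.
--     prefix = []
--     s = 0
--     for x in A:
--         s += x
--         prefix.append(s)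
--     total = prefix[-1]          # raises IndexError on empty input, like the original
--     if len(A) == 1:
--         return abs(A[0])
--     return min([abs(2 * prefix[p - 1] - total) for p in range(1, len(A))])
-- ===== Notes on version B (the rewrite author's own statement) =====
-- stated objective: alternative
-- what changed: B first materialises the full prefix-sum table in one pass and then, in a separate pass, takes min(|2*prefix[p-1]-total|) over split points, instead of A's single loop updating leftSum/rightSum/minDiff counters incrementally.
-- outside the precondition, e.g. on solution([]): A raises IndexError, B raises IndexError
import Mathlib
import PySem

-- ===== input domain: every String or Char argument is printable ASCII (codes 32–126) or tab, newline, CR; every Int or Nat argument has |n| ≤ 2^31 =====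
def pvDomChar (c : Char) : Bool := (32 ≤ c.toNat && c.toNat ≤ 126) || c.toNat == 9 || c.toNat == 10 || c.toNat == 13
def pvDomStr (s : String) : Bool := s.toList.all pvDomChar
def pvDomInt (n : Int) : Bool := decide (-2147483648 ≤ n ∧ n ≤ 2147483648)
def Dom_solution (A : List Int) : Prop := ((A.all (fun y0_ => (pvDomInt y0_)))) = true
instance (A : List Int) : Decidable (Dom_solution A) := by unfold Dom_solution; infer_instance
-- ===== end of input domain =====

-- B builds the full prefix-sum table first and then takes the minimum of |2*prefix[p]-total|
-- over split points in a separate pass (alternative decomposition; equivalence of return values).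

-- ===== PORT A =====
def solution (A : List Int) : Int :=
  match PySem.List.pyGet? A 0 with
  | none => 0   -- indexing the first element raises IndexError on the empty list; excluded by Pre_solution
  | some a0 =>
    let leftSum := a0
    let rightSum := A.sum - leftSum
    let minDiff := |leftSum - rightSum|
    let st := (PySem.List.pyRange 1 ((A.length : Int) - 1) 1).foldl
      (fun (st : Int × Int × Int) i =>
        let x := (PySem.List.pyGet? A i).getD 0
        let leftSum' := st.1 + x
        let rightSum' := st.2.1 - x
        let diff := |leftSum' - rightSum'|
        (leftSum', rightSum', min st.2.2 diff))
      (leftSum, rightSum, minDiff)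
    st.2.2

-- ===== PORT B =====
def solution_alt (A : List Int) : Int :=
  let pfx := (A.foldl (fun (acc : List Int × Int) x => (acc.1 ++ [acc.2 + x], acc.2 + x)) ([], 0)).1
  match PySem.List.pyGet? pfx (-1) with
  | none => 0   -- indexing the last prefix entry raises IndexError on the empty list; excluded by Pre_solution
  | some total =>
    if A.length = 1 then |(PySem.List.pyGet? A 0).getD 0|
    else
      (((PySem.List.pyRange 1 (A.length : Int) 1).map
          (fun p => |2 * (PySem.List.pyGet? pfx (p - 1)).getD 0 - total|)).min?).getD 0

-- ===== PRECONDITION & SPEC =====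
-- A indexes the first element before anything else and so raises IndexError on the empty list (B likewise, via the last prefix entry).
def Pre_solution (A : List Int) : Prop := A ≠ []
instance (A : List Int) : Decidable (Pre_solution A) := by unfold Pre_solution; infer_instance
def pvWitness_solution : List Int := [3, 1, 2, 4, 3]

def Spec_solution (A : List Int) (out : Int) : Prop := out = solution_alt A
instance (A : List Int) (out : Int) : Decidable (Spec_solution A out) := by unfold Spec_solution; infer_instance

-- ===== CLAIM (what is proved, stated in full; the proofs are below) =====
def Claim_equal_solution : Prop := ∀ (A : List Int), Dom_solution A → Pre_solution A → Spec_solution A (solution A)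

-- ===== LEMMAS AND PROOFS =====

-- prefix sum of the first p elements
def pvL (A : List Int) (p : Nat) : Int := (A.take p).sum
-- the difference at split point p
def pvF (A : List Int) (p : Nat) : Int := |2 * pvL A p - A.sum|
-- common normal form of both programs
def pvRef (A : List Int) : Int :=
  (List.range (A.length - 2)).foldl (fun M k => min M (pvF A (k + 2))) (pvF A 1)

lemma pvL_succ (A : List Int) (p : Nat) (h : p < A.length) :
    pvL A (p + 1) = pvL A p + A[p] := by
  rw [pvL, pvL]
  exact List.sum_take_succ A p h

lemma pvL_one (a : Int) (rest : List Int) : pvL (a :: rest) 1 = a := by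
  simp [pvL]

-- A's loop invariant
lemma foldA_inv (A : List Int) (j : Nat) (M0 : Int) (hj : j = 0 ∨ j + 1 < A.length) :
    (List.range j).foldl
      (fun (st : Int × Int × Int) (k : Nat) =>
        let x := (PySem.List.pyGet? A (1 + (k : Int))).getD 0
        let leftSum' := st.1 + x
        let rightSum' := st.2.1 - x
        let diff := |leftSum' - rightSum'|
        (leftSum', rightSum', min st.2.2 diff))
      (pvL A 1, A.sum - pvL A 1, M0)
    = (pvL A (j + 1), A.sum - pvL A (j + 1),
       (List.range j).foldl (fun M k => min M (pvF A (k + 2))) M0) := by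
  induction j with
  | zero => simp
  | succ j ih =>
    have hjn : j + 1 < A.length := by omega
    have hj' : j = 0 ∨ j + 1 < A.length := by omega
    rw [List.range_succ, List.foldl_append, List.foldl_append, ih hj']
    simp only [List.foldl_cons, List.foldl_nil]
    have hx : (PySem.List.pyGet? A (1 + (j : Int))).getD 0 = A[j + 1] := by
      have : (1 : Int) + (j : Int) = ((j + 1 : Nat) : Int) := by omega
      rw [this, PySem.List.pyGet?_natCast, List.getElem?_eq_getElem hjn]
      rfl
    have hL : pvL A (j + 1) + A[j + 1] = pvL A (j + 2) := by
      rw [pvL_succ A (j + 1) hjn]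
    simp only [hx, Prod.mk.injEq]
    refine ⟨hL, by rw [← hL]; ring, ?_⟩
    congr 1
    rw [pvF, ← hL]
    congr 1
    ring

lemma refA (A : List Int) (hA : A ≠ []) : solution A = pvRef A := by
  obtain ⟨a, rest, rfl⟩ := List.exists_cons_of_ne_nil hA
  simp only [solution, PySem.List.pyGet?_zero_cons]
  rw [PySem.List.pyRange_one, List.foldl_map]
  have hlen : (((a :: rest).length : Int) - 1 - 1).toNat = (a :: rest).length - 2 := by
    omega
  have hinit : |a - ((a :: rest).sum - a)| = pvF (a :: rest) 1 := by
    rw [pvF, pvL_one]; congr 1; ring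
  rw [hlen]
  have := foldA_inv (a :: rest) ((a :: rest).length - 2)
    (|a - ((a :: rest).sum - a)|) (by omega)
  rw [pvL_one] at this
  rw [this, hinit]
  rfl

-- the prefix-table fold of B
lemma prefFold (B : List Int) : ∀ (l : List Int) (s : Int),
    B.foldl (fun (acc : List Int × Int) x => (acc.1 ++ [acc.2 + x], acc.2 + x)) (l, s)
    = (l ++ (List.range B.length).map (fun k => s + pvL B (k + 1)), s + B.sum) := by
  induction B with
  | nil => intro l s; simp
  | cons x xs ih =>
    intro l s
    simp only [List.foldl_cons, ih, Prod.mk.injEq]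
    constructor
    · rw [List.length_cons, List.range_succ_eq_map, List.map_cons, List.map_map,
        List.append_assoc, List.singleton_append]
      congr 1
      congr 1
      · simp [pvL]
      · refine List.map_congr_left fun k _ => ?_
        simp only [Function.comp_apply, pvL, List.take_succ_cons, List.sum_cons]
        ring
    · simp [List.sum_cons]; ring

lemma refB (A : List Int) (hA : A ≠ []) : solution_alt A = pvRef A := by
  have hn : 1 ≤ A.length := List.length_pos_iff.mpr hA
  unfold solution_alt
  rw [prefFold A [] 0]
  simp only [List.nil_append]
  set pfx := (List.range A.length).map (fun k => (0 : Int) + pvL A (k + 1)) with hpfx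
  have hplen : pfx.length = A.length := by simp [hpfx]
  have hlast : PySem.List.pyGet? pfx (-1) = some A.sum := by
    rw [PySem.List.pyGet?_neg_one, List.getLast?_eq_getElem?, hplen, hpfx]
    rw [List.getElem?_map, List.getElem?_range (by omega)]
    have h' : A.length - 1 + 1 = A.length := by omega
    simp [pvL, h']
  rw [hlast]
  simp only []
  by_cases h1 : A.length = 1
  · rw [if_pos h1]
    obtain ⟨a, rest, rfl⟩ := List.exists_cons_of_ne_nil hA
    have hrest : rest = [] := by
      have := h1
      simp only [List.length_cons] at this
      exact List.length_eq_zero_iff.mp (by omega)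
    subst hrest
    have h2 : (2 : Int) * a - a = a := by ring
    simp [pvRef, pvF, pvL, h2]
  · rw [if_neg h1]
    have hn2 : 2 ≤ A.length := by omega
    rw [PySem.List.pyRange_one, List.map_map]
    have hlen2 : (((A.length : Int)) - 1).toNat = A.length - 1 := by omega
    rw [hlen2]
    have hmapeq : (List.range (A.length - 1)).map
        ((fun p => |2 * (PySem.List.pyGet? pfx (p - 1)).getD 0 - A.sum|) ∘ (fun k : Nat => (1 : Int) + k))
        = (List.range (A.length - 1)).map (fun k => pvF A (k + 1)) := by
      apply List.map_congr_left
      intro k hk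
      rw [List.mem_range] at hk
      have hkA : k < pfx.length := by omega
      simp only [Function.comp]
      have : ((1 : Int) + k) - 1 = ((k : Nat) : Int) := by omega
      rw [this, PySem.List.pyGet?_natCast, List.getElem?_eq_getElem hkA]
      simp only [Option.getD_some]
      have : pfx[k] = pvL A (k + 1) := by
        simp [hpfx]
      rw [this, pvF]
    rw [hmapeq]
    have hsplit : A.length - 1 = (A.length - 2) + 1 := by omega
    rw [hsplit, List.range_succ_eq_map, List.map_cons, List.map_map, List.min?_cons']
    simp only [Option.getD_some]
    rw [List.foldl_map]
    rfl

-- ===== VERDICT (by name: the statement is the Claim_ definition above) =====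
theorem solution_spec : Claim_equal_solution := by
  intro A _ hPre
  unfold Spec_solution
  rw [refA A hPre, refB A hPre]
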